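-- pv_equiv track=rewrite | github.com/yeclairer/Weekly_coding_test | 1week/1week_kym.py | solution
-- ===== SOURCE A (Python) =====
-- def solution(price, money, count):
--     new_price = 0
--     for i in range(1,count+1):
--         new_price += price*i
--     answer = new_price - money
--
--     if answer <= 0:
--         return 0
--
--     return answer
-- ===== SOURCE B (Python) =====
-- def solution(price, money, count):
--     total = price * count * (count + 1) // 2 if count > 0 else 0
--     return max(0, total - money)
-- ===== Notes on version B (the rewrite author's own statement) =====
-- stated objective: faster
-- what changed: Replaces the O(count) summation loop with the closed-form arithmetic-series formula price*count*(count+1)//2 and max(0,...) instead of the branch.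
import Mathlib
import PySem

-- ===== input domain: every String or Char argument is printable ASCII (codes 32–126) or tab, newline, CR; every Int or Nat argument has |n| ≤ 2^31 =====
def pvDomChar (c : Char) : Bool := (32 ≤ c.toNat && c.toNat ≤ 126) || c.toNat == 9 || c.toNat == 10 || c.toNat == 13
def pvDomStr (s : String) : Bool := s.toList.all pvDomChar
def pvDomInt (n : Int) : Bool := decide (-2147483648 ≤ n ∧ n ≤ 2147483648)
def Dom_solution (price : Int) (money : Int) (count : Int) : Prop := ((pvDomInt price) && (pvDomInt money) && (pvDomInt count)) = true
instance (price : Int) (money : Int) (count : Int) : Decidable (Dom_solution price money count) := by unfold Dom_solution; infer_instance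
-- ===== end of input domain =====

-- B replaces A's O(count) summation loop by the closed-form series price*count*(count+1)//2 (O(1)).

-- ===== PORT A =====
-- the 'for i in range(1, count+1)' loop: tail recursion over the same state
-- (new_price, i), one step per loop iteration; fuel = len(range(1, count+1))
def solutionLoop (price : Int) (new_price : Int) (i : Int) : Nat → Int
  | 0 => new_price
  | n + 1 => solutionLoop price (new_price + price * i) (i + 1) n

def solution (price : Int) (money : Int) (count : Int) : Int :=
  let new_price := solutionLoop price 0 1 ((count + 1 - 1).toNat)
  let answer := new_price - money
  if answer ≤ 0 then 0 else answer

-- ===== PORT B =====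
def solution_alt (price : Int) (money : Int) (count : Int) : Int :=
  let total := if count > 0 then PySem.Int.floordiv (price * count * (count + 1)) 2 else 0
  max 0 (total - money)

-- ===== PRECONDITION & SPEC =====
def Spec_solution (price : Int) (money : Int) (count : Int) (out : Int) : Prop := out = solution_alt price money count
instance (price : Int) (money : Int) (count : Int) (out : Int) : Decidable (Spec_solution price money count out) := by unfold Spec_solution; infer_instance

-- ===== CLAIM (what is proved, stated in full; the proofs are below) =====
def Claim_equal_solution : Prop := ∀ (price : Int) (money : Int) (count : Int), Dom_solution price money count → Spec_solution price money count (solution price money count)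

-- ===== LEMMAS AND PROOFS =====

-- loop invariant, doubled to avoid division: 2·loop = 2·acc + price·n·(2i+n−1)
theorem pv_loop_double (price : Int) (acc i : Int) (n : Nat) :
    2 * solutionLoop price acc i n = 2 * acc + price * n * (2 * i + n - 1) := by
  induction n generalizing acc i with
  | zero => simp [solutionLoop]
  | succ m ih =>
    rw [solutionLoop, ih]
    push_cast
    ring

theorem pv_loop_closed (price : Int) (count : Int) (hc : 0 < count) :
    solutionLoop price 0 1 ((count + 1 - 1).toNat)
      = PySem.Int.floordiv (price * count * (count + 1)) 2 := by
  have h := pv_loop_double price 0 1 ((count + 1 - 1).toNat)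
  have hn : (((count + 1 - 1).toNat : Int)) = count := by omega
  rw [hn] at h
  have h' : 2 * 0 + price * count * (2 * 1 + count - 1) = price * count * (count + 1) := by
    ring
  rw [h'] at h
  rw [PySem.Int.floordiv_eq_ediv_of_pos (by omega)]
  omega

-- ===== VERDICT (by name: the statement is the Claim_ definition above) =====
theorem solution_spec : Claim_equal_solution := by
  intro price money count _
  unfold Spec_solution solution solution_alt
  by_cases hc : 0 < count
  · simp only [hc, if_pos, pv_loop_closed price count hc]
    omega
  · have h : (count + 1 - 1).toNat = 0 := by omega
    simp only [h, solutionLoop, if_neg hc]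
    omega
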